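-- pv_equiv track=rewrite | github.com/brynnhs/fUSPredict | code/utils/autocorrelation.py | canonical_session_id
-- ===== SOURCE A (Python) =====
-- def canonical_session_id(value, known_modes):
--     s = str(value)
--     if s.startswith("baseline_"):
--         s = s[len("baseline_"):]
--     for mode in sorted(known_modes, key=len, reverse=True):
--         suffix = f"_{mode}"
--         if s.endswith(suffix):
--             s = s[:-len(suffix)]
--             break
--     return s
-- ===== SOURCE B (Python) =====
-- def canonical_session_id(value, known_modes):
--     s = str(value)
--     if s.startswith("baseline_"):
--         s = s[len("baseline_"):]
--     matches = [m for m in known_modes if s.endswith("_" + m)]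
--     if matches:
--         best = max(matches, key=len)
--         s = s[:-(len(best) + 1)]
--     return s
-- ===== Notes on version B (the rewrite author's own statement) =====
-- stated objective: simpler
-- what changed: Replaced the length-descending sort plus first-match break loop by collecting the matching modes and taking the longest with max(key=len), so no sort is performed.
import Mathlib
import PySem

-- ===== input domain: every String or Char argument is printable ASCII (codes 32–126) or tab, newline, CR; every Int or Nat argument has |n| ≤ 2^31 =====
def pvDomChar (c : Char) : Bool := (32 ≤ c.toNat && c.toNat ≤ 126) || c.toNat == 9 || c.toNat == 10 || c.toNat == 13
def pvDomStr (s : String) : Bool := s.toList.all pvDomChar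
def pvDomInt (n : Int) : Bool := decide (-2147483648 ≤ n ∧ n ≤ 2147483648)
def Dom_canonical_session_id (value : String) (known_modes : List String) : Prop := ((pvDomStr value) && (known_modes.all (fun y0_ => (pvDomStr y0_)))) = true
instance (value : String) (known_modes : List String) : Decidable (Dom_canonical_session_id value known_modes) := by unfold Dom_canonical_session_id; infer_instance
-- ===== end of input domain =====

-- B replaces A's length-descending sort + break loop by collecting the matching
-- modes and cutting by the longest one (max by len): simpler, no sort.

-- ===== PORT A =====
-- the loop 'for mode in …: if s.endswith(suffix): s = s[:-len(suffix)]; break'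
def csiLoopA : List String → String → String
  | [], s => s
  | mode :: rest, s =>
      let suffix := "_" ++ mode
      if PySem.Str.endswith s suffix then
        PySem.Str.slice s none (some (-(PySem.Str.len suffix)))
      else csiLoopA rest s

def canonical_session_id (value : String) (known_modes : List String) : String :=
  let s := value
  let s := if PySem.Str.startswith s "baseline_" then PySem.Str.slice s (some 9) none else s
  csiLoopA (PySem.List.sorted known_modes (fun m => PySem.Str.len m) true) s

-- ===== PORT B =====
def canonical_session_id_alt (value : String) (known_modes : List String) : String :=
  let s := value
  let s := if PySem.Str.startswith s "baseline_" then PySem.Str.slice s (some 9) none else s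
  let ms := known_modes.filter (fun m => PySem.Str.endswith s ("_" ++ m))
  match PySem.List.max? ms (fun m => PySem.Str.len m) with
  | none => s
  | some best => PySem.Str.slice s none (some (-(PySem.Str.len best + 1)))

-- ===== PRECONDITION & SPEC =====
def Spec_canonical_session_id (value : String) (known_modes : List String) (out : String) : Prop := out = canonical_session_id_alt value known_modes
instance (value : String) (known_modes : List String) (out : String) : Decidable (Spec_canonical_session_id value known_modes out) := by unfold Spec_canonical_session_id; infer_instance

-- ===== CLAIM (what is proved, stated in full; the proofs are below) =====
def Claim_equal_canonical_session_id : Prop := ∀ (value : String) (known_modes : List String), Dom_canonical_session_id value known_modes → Spec_canonical_session_id value known_modes (canonical_session_id value known_modes)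

-- ===== LEMMAS AND PROOFS =====

-- Python max(xs, key) returns the FIRST maximal element: if the head dominates, it wins
theorem pvMax_cons_of_le {α : Type} (key : α → Int) (m : α) (ys : List α)
    (h : ∀ u ∈ ys, key u ≤ key m) :
    PySem.List.max? (m :: ys) key = some m := by
  induction ys with
  | nil => rfl
  | cons y ys ih =>
    have hy : ¬ key m < key y := not_lt.mpr (h y (by simp))
    have e1 : PySem.List.max? (m :: y :: ys) key = PySem.List.max? (m :: ys) key := by
      simp [PySem.List.max?, List.foldl, hy]
    rw [e1]
    exact ih (fun u hu => h u (by simp [hu]))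

theorem pvLenUnderscore (m : String) :
    PySem.Str.len ("_" ++ m) = PySem.Str.len m + 1 := by
  simp [PySem.Str.len]

-- A's loop over a length-descending list equals cutting by the max-length match of that list
theorem csiLoopA_eq_max (l : List String) (s : String)
    (hp : l.Pairwise (fun a b => PySem.Str.len b ≤ PySem.Str.len a)) :
    csiLoopA l s =
      match PySem.List.max? (l.filter (fun m => PySem.Str.endswith s ("_" ++ m)))
          (fun m => PySem.Str.len m) with
      | none => s
      | some best => PySem.Str.slice s none (some (-(PySem.Str.len best + 1))) := by
  induction l with
  | nil => simp [csiLoopA, PySem.List.max?]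
  | cons m t ih =>
    rcases List.pairwise_cons.mp hp with ⟨hm, ht⟩
    by_cases hend : PySem.Str.endswith s ("_" ++ m) = true
    · have hfil : (m :: t).filter (fun x => PySem.Str.endswith s ("_" ++ x)) =
          m :: t.filter (fun x => PySem.Str.endswith s ("_" ++ x)) := by
        simp only [List.filter_cons, hend, if_true]
      have hmax : PySem.List.max?
          ((m :: t).filter (fun x => PySem.Str.endswith s ("_" ++ x)))
          (fun x => PySem.Str.len x) = some m := by
        rw [hfil]
        exact pvMax_cons_of_le _ m _
          (fun u hu => hm u (List.mem_of_mem_filter hu))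
      rw [hmax]
      simp only [csiLoopA, hend, if_true]
      rw [pvLenUnderscore]
    · have hend' : PySem.Str.endswith s ("_" ++ m) = false := by
        simpa using hend
      have hfil : (m :: t).filter (fun x => PySem.Str.endswith s ("_" ++ x)) =
          t.filter (fun x => PySem.Str.endswith s ("_" ++ x)) := by
        simp only [List.filter_cons, hend', if_false, Bool.false_eq_true]
      rw [hfil]
      simp only [csiLoopA, hend', if_false, Bool.false_eq_true]
      exact ih ht

-- ===== VERDICT (by name: the statement is the Claim_ definition above) =====
theorem canonical_session_id_spec : Claim_equal_canonical_session_id := by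
  intro value known_modes _
  show canonical_session_id value known_modes = canonical_session_id_alt value known_modes
  unfold canonical_session_id canonical_session_id_alt
  dsimp only
  set s := if PySem.Str.startswith value "baseline_" then PySem.Str.slice value (some 9) none else value with hs
  rw [csiLoopA_eq_max _ s (PySem.List.sorted_pairwise_rev known_modes _)]
  have hperm : ((PySem.List.sorted known_modes (fun m => PySem.Str.len m) true).filter
      (fun m => PySem.Str.endswith s ("_" ++ m))).Perm
      (known_modes.filter (fun m => PySem.Str.endswith s ("_" ++ m))) :=
    (PySem.List.sorted_perm known_modes (fun m => PySem.Str.len m) true).filter _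
  cases hA : PySem.List.max? ((PySem.List.sorted known_modes (fun m => PySem.Str.len m) true).filter
      (fun m => PySem.Str.endswith s ("_" ++ m))) (fun m => PySem.Str.len m) with
  | none =>
    have : (known_modes.filter (fun m => PySem.Str.endswith s ("_" ++ m))) = [] := by
      have h2 := hperm
      rw [(PySem.List.max?_eq_none_iff _ _).mp hA] at h2
      exact List.Perm.eq_nil h2.symm
    rw [this]
    rfl
  | some a =>
    have haMem : a ∈ known_modes.filter (fun m => PySem.Str.endswith s ("_" ++ m)) :=
      hperm.mem_iff.mp (PySem.List.max?_mem hA)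
    cases hB : PySem.List.max? (known_modes.filter (fun m => PySem.Str.endswith s ("_" ++ m)))
        (fun m => PySem.Str.len m) with
    | none =>
      rw [(PySem.List.max?_eq_none_iff _ _).mp hB] at haMem
      simp at haMem
    | some b =>
      have hbMem : b ∈ (PySem.List.sorted known_modes (fun m => PySem.Str.len m) true).filter
          (fun m => PySem.Str.endswith s ("_" ++ m)) :=
        hperm.mem_iff.mpr (PySem.List.max?_mem hB)
      have hab : PySem.Str.len a = PySem.Str.len b :=
        le_antisymm (PySem.List.max?_isMax hB a haMem) (PySem.List.max?_isMax hA b hbMem)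
      simp only [hab]
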